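-- pv_equiv track=rewrite | github.com/Reshigan/Aria---Document-Management-Employee | backend/app/api/bots.py | categorize_bot
-- ===== SOURCE A (Python) =====
-- def categorize_bot(bot_name: str) -> str:
--     """Categorize bot based on name"""
--     if any(x in bot_name for x in ["invoice", "accounts_payable", "accounts_receivable", "ar_collections", "expense"]):
--         return "Financial Operations"
--     elif any(x in bot_name for x in ["bank", "cash", "payment", "treasury"]):
--         return "Banking & Treasury"
--     elif any(x in bot_name for x in ["tax", "compliance", "bbbee", "audit"]):
--         return "Compliance & Regulatory"
--     elif any(x in bot_name for x in ["payroll", "hr", "employee", "benefits", "leave"]):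
--         return "Human Resources"
--     elif any(x in bot_name for x in ["inventory", "procurement", "supplier", "purchase", "stock", "warehouse"]):
--         return "Supply Chain"
--     elif any(x in bot_name for x in ["sales", "customer", "order", "crm", "lead"]):
--         return "Sales & CRM"
--     elif any(x in bot_name for x in ["production", "manufacturing", "quality", "maintenance", "mrp"]):
--         return "Manufacturing"
--     elif any(x in bot_name for x in ["general_ledger", "journal", "financial_close", "financial_reporting"]):
--         return "Accounting"
--     elif any(x in bot_name for x in ["document", "email", "data", "archive"]):
--         return "Document Management"
--     else:
--         return "General Operations"
-- ===== SOURCE B (Python) =====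
-- # B: instead of testing each keyword for membership, enumerate the substrings of
-- # bot_name (only at the lengths keywords actually have), look each up in a
-- # keyword -> (priority, category) hash table built once from the branch order,
-- # and return the category of the lowest-priority hit.
--
-- _CATEGORIES = [
--     ("Financial Operations", ["invoice", "accounts_payable", "accounts_receivable", "ar_collections", "expense"]),
--     ("Banking & Treasury", ["bank", "cash", "payment", "treasury"]),
--     ("Compliance & Regulatory", ["tax", "compliance", "bbbee", "audit"]),
--     ("Human Resources", ["payroll", "hr", "employee", "benefits", "leave"]),
--     ("Supply Chain", ["inventory", "procurement", "supplier", "purchase", "stock", "warehouse"]),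
--     ("Sales & CRM", ["sales", "customer", "order", "crm", "lead"]),
--     ("Manufacturing", ["production", "manufacturing", "quality", "maintenance", "mrp"]),
--     ("Accounting", ["general_ledger", "journal", "financial_close", "financial_reporting"]),
--     ("Document Management", ["document", "email", "data", "archive"]),
-- ]
--
-- _KEYWORDS = {kw: (prio, cat) for prio, (cat, kws) in enumerate(_CATEGORIES) for kw in kws}
-- _LENS = sorted({len(kw) for kw in _KEYWORDS})
--
-- def categorize_bot(bot_name: str) -> str:
--     """Categorize bot based on name"""
--     best = None
--     n = len(bot_name)
--     for L in _LENS: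
--         for i in range(n - L + 1):
--             hit = _KEYWORDS.get(bot_name[i:i + L])
--             if hit is not None and (best is None or hit[0] < best[0]):
--                 best = hit
--     return best[1] if best is not None else "General Operations"
-- ===== Notes on version B (the rewrite author's own statement) =====
-- stated objective: alternative
-- what changed: Instead of running a substring search for each of the 42 keywords through an if/elif chain, B enumerates the substrings of bot_name (only at the lengths keywords have), looks each up in a keyword->(priority, category) hash table built once from the branch order, and returns the category of the lowest-priority hit.
import Mathlib
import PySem

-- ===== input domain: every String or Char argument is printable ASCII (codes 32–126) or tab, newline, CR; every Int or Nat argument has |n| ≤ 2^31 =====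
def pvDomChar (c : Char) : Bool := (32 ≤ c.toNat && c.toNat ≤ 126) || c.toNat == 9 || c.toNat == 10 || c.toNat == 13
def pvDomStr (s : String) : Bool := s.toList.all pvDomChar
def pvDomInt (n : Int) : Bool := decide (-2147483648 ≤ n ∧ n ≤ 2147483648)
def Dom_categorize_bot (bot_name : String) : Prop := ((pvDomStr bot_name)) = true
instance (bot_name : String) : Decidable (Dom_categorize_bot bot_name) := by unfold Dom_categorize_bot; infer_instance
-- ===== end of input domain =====

-- B replaces the per-keyword substring searches by enumerating the substrings of the
-- input (at keyword lengths only) and looking them up in a keyword→(priority, category)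
-- hash table, keeping the lowest-priority hit; same return value (objective: alternative).

-- ===== PORT A =====
-- literal transliteration of A's if/elif chain; 'x in bot_name' = PySem.Str.isIn
def categorize_bot (bot_name : String) : String :=
  if ["invoice", "accounts_payable", "accounts_receivable", "ar_collections", "expense"].any (fun x => PySem.Str.isIn x bot_name) then
    "Financial Operations"
  else if ["bank", "cash", "payment", "treasury"].any (fun x => PySem.Str.isIn x bot_name) then
    "Banking & Treasury"
  else if ["tax", "compliance", "bbbee", "audit"].any (fun x => PySem.Str.isIn x bot_name) then
    "Compliance & Regulatory"
  else if ["payroll", "hr", "employee", "benefits", "leave"].any (fun x => PySem.Str.isIn x bot_name) then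
    "Human Resources"
  else if ["inventory", "procurement", "supplier", "purchase", "stock", "warehouse"].any (fun x => PySem.Str.isIn x bot_name) then
    "Supply Chain"
  else if ["sales", "customer", "order", "crm", "lead"].any (fun x => PySem.Str.isIn x bot_name) then
    "Sales & CRM"
  else if ["production", "manufacturing", "quality", "maintenance", "mrp"].any (fun x => PySem.Str.isIn x bot_name) then
    "Manufacturing"
  else if ["general_ledger", "journal", "financial_close", "financial_reporting"].any (fun x => PySem.Str.isIn x bot_name) then
    "Accounting"
  else if ["document", "email", "data", "archive"].any (fun x => PySem.Str.isIn x bot_name) then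
    "Document Management"
  else
    "General Operations"

-- ===== PORT B =====
-- _CATEGORIES from Source B
def pvCategories : List (String × List String) :=
  [("Financial Operations", ["invoice", "accounts_payable", "accounts_receivable", "ar_collections", "expense"]),
   ("Banking & Treasury", ["bank", "cash", "payment", "treasury"]),
   ("Compliance & Regulatory", ["tax", "compliance", "bbbee", "audit"]),
   ("Human Resources", ["payroll", "hr", "employee", "benefits", "leave"]),
   ("Supply Chain", ["inventory", "procurement", "supplier", "purchase", "stock", "warehouse"]),
   ("Sales & CRM", ["sales", "customer", "order", "crm", "lead"]),
   ("Manufacturing", ["production", "manufacturing", "quality", "maintenance", "mrp"]),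
   ("Accounting", ["general_ledger", "journal", "financial_close", "financial_reporting"]),
   ("Document Management", ["document", "email", "data", "archive"])]

-- _KEYWORDS = {kw: (prio, cat) for prio, (cat, kws) in enumerate(_CATEGORIES) for kw in kws}
def pvKeywordDict : PySem.Dict String (Int × String) :=
  PySem.Dict.ofList ((PySem.List.enumerate pvCategories).flatMap
    (fun p => p.2.2.map (fun kw => (kw, (p.1, p.2.1)))))

-- _LENS = sorted({len(kw) for kw in _KEYWORDS})
def pvLens : List Int :=
  PySem.List.sorted (PySem.Set.ofList (pvKeywordDict.keys.map PySem.Str.len)) (fun x => x) false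

def categorize_bot_alt (bot_name : String) : String :=
  match pvLens.foldl (fun best L =>
      (PySem.List.pyRange 0 (PySem.Str.len bot_name - L + 1) 1).foldl (fun best i =>
        match pvKeywordDict.get? (PySem.Str.slice bot_name (some i) (some (i + L))) with
        | some hit =>
          match best with
          | none => some hit
          | some b => if hit.1 < b.1 then some hit else best
        | none => best) best) none with
  | some b => b.2
  | none => "General Operations"

-- ===== PRECONDITION & SPEC =====
def Spec_categorize_bot (bot_name : String) (out : String) : Prop := out = categorize_bot_alt bot_name
instance (bot_name : String) (out : String) : Decidable (Spec_categorize_bot bot_name out) := by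
  unfold Spec_categorize_bot; infer_instance

-- ===== CLAIM =====
def Claim_equal_categorize_bot : Prop :=
  ∀ (bot_name : String), Dom_categorize_bot bot_name → Spec_categorize_bot bot_name (categorize_bot bot_name)

-- ===== LEMMAS AND PROOFS =====

-- the association list the keyword dict holds (insertion order)
def pvPairs : List (String × (Int × String)) :=
  [("invoice", (0, "Financial Operations")), ("accounts_payable", (0, "Financial Operations")),
   ("accounts_receivable", (0, "Financial Operations")), ("ar_collections", (0, "Financial Operations")),
   ("expense", (0, "Financial Operations")),
   ("bank", (1, "Banking & Treasury")), ("cash", (1, "Banking & Treasury")),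
   ("payment", (1, "Banking & Treasury")), ("treasury", (1, "Banking & Treasury")),
   ("tax", (2, "Compliance & Regulatory")), ("compliance", (2, "Compliance & Regulatory")),
   ("bbbee", (2, "Compliance & Regulatory")), ("audit", (2, "Compliance & Regulatory")),
   ("payroll", (3, "Human Resources")), ("hr", (3, "Human Resources")),
   ("employee", (3, "Human Resources")), ("benefits", (3, "Human Resources")), ("leave", (3, "Human Resources")),
   ("inventory", (4, "Supply Chain")), ("procurement", (4, "Supply Chain")),
   ("supplier", (4, "Supply Chain")), ("purchase", (4, "Supply Chain")),
   ("stock", (4, "Supply Chain")), ("warehouse", (4, "Supply Chain")),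
   ("sales", (5, "Sales & CRM")), ("customer", (5, "Sales & CRM")), ("order", (5, "Sales & CRM")),
   ("crm", (5, "Sales & CRM")), ("lead", (5, "Sales & CRM")),
   ("production", (6, "Manufacturing")), ("manufacturing", (6, "Manufacturing")),
   ("quality", (6, "Manufacturing")), ("maintenance", (6, "Manufacturing")), ("mrp", (6, "Manufacturing")),
   ("general_ledger", (7, "Accounting")), ("journal", (7, "Accounting")),
   ("financial_close", (7, "Accounting")), ("financial_reporting", (7, "Accounting")),
   ("document", (8, "Document Management")), ("email", (8, "Document Management")),
   ("data", (8, "Document Management")), ("archive", (8, "Document Management"))]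

-- branch keyword lists / category names of A's chain
def pvK : Nat → List String
  | 0 => ["invoice", "accounts_payable", "accounts_receivable", "ar_collections", "expense"]
  | 1 => ["bank", "cash", "payment", "treasury"]
  | 2 => ["tax", "compliance", "bbbee", "audit"]
  | 3 => ["payroll", "hr", "employee", "benefits", "leave"]
  | 4 => ["inventory", "procurement", "supplier", "purchase", "stock", "warehouse"]
  | 5 => ["sales", "customer", "order", "crm", "lead"]
  | 6 => ["production", "manufacturing", "quality", "maintenance", "mrp"]
  | 7 => ["general_ledger", "journal", "financial_close", "financial_reporting"]
  | 8 => ["document", "email", "data", "archive"]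
  | _ => []

def pvC : Nat → String
  | 0 => "Financial Operations"
  | 1 => "Banking & Treasury"
  | 2 => "Compliance & Regulatory"
  | 3 => "Human Resources"
  | 4 => "Supply Chain"
  | 5 => "Sales & CRM"
  | 6 => "Manufacturing"
  | 7 => "Accounting"
  | 8 => "Document Management"
  | _ => "General Operations"

def pvCond (j : Nat) (s : String) : Bool := (pvK j).any (fun kw => PySem.Str.isIn kw s)

-- the 'best'-update of B's loop
def pvUpd (best : Option (Int × String)) (hit : Int × String) : Option (Int × String) :=
  match best with
  | none => some hit
  | some b => if hit.1 < b.1 then some hit else best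

-- the flat list of table hits B's two nested loops run over
def pvHits (s : String) : List (Int × String) :=
  pvLens.flatMap (fun L =>
    (PySem.List.pyRange 0 (PySem.Str.len s - L + 1) 1).filterMap
      (fun i => pvKeywordDict.get? (PySem.Str.slice s (some i) (some (i + L)))))

lemma pvFoldl_filterMap_match {α β γ : Type} (l : List α) (f : α → Option β) (g : γ → β → γ) (x : γ) :
    (l.filterMap f).foldl g x = l.foldl (fun x a => match f a with | some b => g x b | none => x) x := by
  induction l generalizing x with
  | nil => rfl
  | cons h t ih => cases hf : f h <;> simp [hf, ih]

lemma pvAlt_eq (s : String) :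
    categorize_bot_alt s =
      (match (pvHits s).foldl pvUpd none with
       | some b => b.2
       | none => "General Operations") := by
  have h : (pvHits s).foldl pvUpd none =
      pvLens.foldl (fun best L =>
        (PySem.List.pyRange 0 (PySem.Str.len s - L + 1) 1).foldl (fun best i =>
          match pvKeywordDict.get? (PySem.Str.slice s (some i) (some (i + L))) with
          | some hit =>
            match best with
            | none => some hit
            | some b => if hit.1 < b.1 then some hit else best
          | none => best) best) none := by
    unfold pvHits
    rw [List.foldl_flatMap]
    apply PySem.List.foldl_congr_mem
    intro acc L _
    rw [pvFoldl_filterMap_match]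
    apply PySem.List.foldl_congr_mem
    intro acc2 i _
    cases pvKeywordDict.get? (PySem.Str.slice s (some i) (some (i + L))) with
    | none => rfl
    | some hit => cases acc2 <;> rfl
  unfold categorize_bot_alt
  rw [← h]


-- fold facts: the result of B's 'best' fold is a minimal-priority element of the hit list
lemma pvFold_some : ∀ (hs : List (Int × String)) (b : Int × String),
    ∃ h, hs.foldl pvUpd (some b) = some h ∧ h.1 ≤ b.1 ∧ (h = b ∨ h ∈ hs) := by
  intro hs
  induction hs with
  | nil => exact fun b => ⟨b, rfl, le_refl _, Or.inl rfl⟩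
  | cons x t ih =>
    intro b
    simp only [List.foldl_cons, show pvUpd (some b) x = if x.1 < b.1 then some x else some b from rfl]
    split_ifs with hx
    · obtain ⟨h, he, hle, hm⟩ := ih x
      exact ⟨h, he, le_trans hle (le_of_lt hx), Or.inr (by rcases hm with h' | h' <;> simp [h'])⟩
    · obtain ⟨h, he, hle, hm⟩ := ih b
      exact ⟨h, he, hle, by rcases hm with h' | h' <;> simp [h']⟩

lemma pvFold_none_iff (hs : List (Int × String)) :
    hs.foldl pvUpd none = none ↔ hs = [] := by
  cases hs with
  | nil => simp
  | cons x t =>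
    simp only [List.foldl_cons, show pvUpd none x = some x from rfl]
    constructor
    · intro h
      obtain ⟨h', he, _, _⟩ := pvFold_some t x
      rw [he] at h
      exact absurd h (by simp)
    · intro h; exact absurd h (by simp)

lemma pvFold_mem (hs : List (Int × String)) (h : Int × String)
    (he : hs.foldl pvUpd none = some h) : h ∈ hs := by
  cases hs with
  | nil => simp at he
  | cons x t =>
    rw [List.foldl_cons, show pvUpd none x = some x from rfl] at he
    obtain ⟨h', he', _, hm⟩ := pvFold_some t x
    rw [he'] at he
    injection he with he
    subst he
    rcases hm with h' | h' <;> simp [h']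

lemma pvFold_min : ∀ (hs : List (Int × String)) (acc : Option (Int × String)) (h h' : Int × String),
    hs.foldl pvUpd acc = some h → h' ∈ hs → h.1 ≤ h'.1 := by
  intro hs
  induction hs with
  | nil => intro _ _ _ _ hm; simp at hm
  | cons x t ih =>
    intro acc h h' he hm
    rw [List.foldl_cons] at he
    rcases List.mem_cons.mp hm with heq | hm'
    · subst heq
      have hc : ∃ c, pvUpd acc h' = some c ∧ c.1 ≤ h'.1 := by
        cases acc with
        | none => exact ⟨h', rfl, le_refl _⟩
        | some b =>
          rw [show pvUpd (some b) h' = if h'.1 < b.1 then some h' else some b from rfl]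
          split_ifs with hx
          · exact ⟨h', rfl, le_refl _⟩
          · exact ⟨b, rfl, le_of_not_gt hx⟩
      obtain ⟨c, hceq, hcle⟩ := hc
      rw [hceq] at he
      obtain ⟨h0, he0, hle0, _⟩ := pvFold_some t c
      rw [he0] at he
      injection he with he
      subst he
      exact le_trans hle0 hcle
    · exact ih (pvUpd acc x) h h' he hm'

-- dictionary lookup ↔ association-list membership
set_option maxRecDepth 100000 in
lemma pvDict_items : pvKeywordDict.items = pvPairs := by decide

set_option maxRecDepth 100000 in
lemma pvDict_nodup : pvKeywordDict.keys.Nodup := by decide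

lemma pvDict_get?_iff (key : String) (v : Int × String) :
    pvKeywordDict.get? key = some v ↔ (key, v) ∈ pvPairs := by
  rw [← pvDict_items]
  exact PySem.Dict.get?_eq_some_iff_mem_items pvKeywordDict key v pvDict_nodup

-- facts about the table, all decidable
set_option maxRecDepth 100000 in
lemma pvPairs_facts : ∀ p ∈ pvPairs,
    0 ≤ p.2.1 ∧ p.2.1 < 9 ∧ p.2.2 = pvC p.2.1.toNat ∧ p.1 ∈ pvK p.2.1.toNat ∧
    PySem.Str.len p.1 ∈ pvLens ∧ 0 < p.1.toList.length := by decide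

set_option maxRecDepth 100000 in
lemma pvK_pairs : ∀ j, j < 9 → ∀ kw ∈ pvK j, (kw, ((j : Int), pvC j)) ∈ pvPairs := by decide

set_option maxRecDepth 100000 in
lemma pvLens_pos : ∀ L ∈ pvLens, 0 < L := by decide

-- substring slice, on the char list
lemma pvSlice_toList (s : String) (i L : Int) (hi : 0 ≤ i) (hL : 0 ≤ L) :
    (PySem.Str.slice s (some i) (some (i + L))).toList = (s.toList.drop i.toNat).take L.toNat := by
  rw [PySem.Str.toList_slice, PySem.Chars.slice_eq_listSlice]
  rw [show PySem.List.slice s.toList (some i) (some (i + L)) = _ from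
    PySem.List.slice_toNat s.toList hi (by omega : (0:Int) ≤ i + L)]
  congr 1
  omega

lemma pvTakeDrop_infix {l : List Char} (n m : Nat) : (l.drop n).take m <:+: l :=
  ((l.drop n).take_prefix m).isInfix.trans (l.drop_suffix n).isInfix

-- the hits of B's loops are exactly the keyword/value pairs whose keyword occurs in s
lemma pvMem_hits_iff (s : String) (v : Int × String) :
    v ∈ pvHits s ↔ ∃ kw, (kw, v) ∈ pvPairs ∧ PySem.Str.isIn kw s = true := by
  constructor
  · intro hv
    obtain ⟨L, hL, hv⟩ := List.mem_flatMap.mp hv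
    obtain ⟨i, hi, hget⟩ := List.mem_filterMap.mp hv
    obtain ⟨hi0, _⟩ := PySem.List.mem_pyRange_one.mp hi
    refine ⟨_, (pvDict_get?_iff _ _).mp hget, ?_⟩
    rw [PySem.Str.isIn_eq]
    apply (PySem.Chars.isIn_iff_infix _ _).mpr
    rw [pvSlice_toList s i L hi0 (le_of_lt (pvLens_pos L hL))]
    exact pvTakeDrop_infix _ _
  · rintro ⟨kw, hp, hin⟩
    obtain ⟨-, -, -, -, hlen, hpos⟩ := pvPairs_facts _ hp
    have hlen' : PySem.Str.len kw ∈ pvLens := hlen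
    have hpos' : 0 < kw.toList.length := hpos
    rw [PySem.Str.isIn_eq] at hin
    obtain ⟨j, hpre⟩ := (PySem.Chars.exists_prefix_drop_iff_isIn _ _).mpr hin
    have hjlen : kw.toList.length ≤ s.toList.length - j := by
      simpa using hpre.length_le
    refine List.mem_flatMap.mpr ⟨PySem.Str.len kw, hlen', List.mem_filterMap.mpr ⟨(j : Int), ?_, ?_⟩⟩
    · refine PySem.List.mem_pyRange_one.mpr ⟨by positivity, ?_⟩
      rw [PySem.Str.len_eq, PySem.Str.len_eq]
      omega
    · apply (pvDict_get?_iff _ _).mpr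
      have hs : PySem.Str.slice s (some (j : Int)) (some ((j : Int) + PySem.Str.len kw)) = kw := by
        apply String.toList_inj.mp
        rw [pvSlice_toList s _ _ (by positivity) (by rw [PySem.Str.len_eq]; positivity)]
        rw [PySem.Str.len_eq]
        simp only [Int.toNat_natCast]
        exact (List.prefix_iff_eq_take.mp hpre).symm
      rw [hs]
      exact hp

lemma pvHit_of_cond (s : String) (j : Nat) (hj : j < 9) (hc : pvCond j s = true) :
    ((j : Int), pvC j) ∈ pvHits s := by
  obtain ⟨kw, hmem, hin⟩ := List.any_eq_true.mp hc
  exact (pvMem_hits_iff s _).mpr ⟨kw, pvK_pairs j hj kw hmem, hin⟩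

-- A's chain, through pvCond / pvC
lemma pvChain_form (s : String) :
    categorize_bot s =
      (if pvCond 0 s then pvC 0 else if pvCond 1 s then pvC 1 else if pvCond 2 s then pvC 2
       else if pvCond 3 s then pvC 3 else if pvCond 4 s then pvC 4 else if pvCond 5 s then pvC 5
       else if pvCond 6 s then pvC 6 else if pvCond 7 s then pvC 7 else if pvCond 8 s then pvC 8
       else "General Operations") := rfl

lemma pvChain_eq (s : String) (j : Nat) (hj : j < 9) (ht : pvCond j s = true)
    (hf : ∀ k, k < j → pvCond k s = false) : categorize_bot s = pvC j := by
  rw [pvChain_form]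
  interval_cases j <;> simp_all

lemma pvChain_default (s : String) (hf : ∀ k, k < 9 → pvCond k s = false) :
    categorize_bot s = "General Operations" := by
  rw [pvChain_form]
  simp [hf]

-- ===== VERDICT =====
theorem categorize_bot_spec : Claim_equal_categorize_bot := by
  intro s _
  unfold Spec_categorize_bot
  rw [pvAlt_eq]
  cases hfold : (pvHits s).foldl pvUpd none with
  | none =>
    have hnil := (pvFold_none_iff _).mp hfold
    have hfalse : ∀ k, k < 9 → pvCond k s = false := by
      intro k hk
      cases hc : pvCond k s with
      | false => rfl
      | true =>
        have hmem := pvHit_of_cond s k hk hc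
        rw [hnil] at hmem
        simp at hmem
    exact pvChain_default s hfalse
  | some h =>
    have hmem := pvFold_mem _ h hfold
    obtain ⟨kw, hp, hin⟩ := (pvMem_hits_iff s h).mp hmem
    obtain ⟨h0, h9, hC, hK, -, -⟩ := pvPairs_facts _ hp
    have h0' : 0 ≤ h.1 := h0
    have h9' : h.1 < 9 := h9
    have hC' : h.2 = pvC h.1.toNat := hC
    have hK' : kw ∈ pvK h.1.toNat := hK
    have hcond : pvCond h.1.toNat s = true := List.any_eq_true.mpr ⟨kw, hK', hin⟩
    have hmin : ∀ k, k < h.1.toNat → pvCond k s = false := by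
      intro k hk
      cases hc : pvCond k s with
      | false => rfl
      | true =>
        have hle : h.1 ≤ (k : Int) := pvFold_min _ _ _ _ hfold (pvHit_of_cond s k (by omega) hc)
        omega
    show categorize_bot s = h.2
    rw [pvChain_eq s h.1.toNat (by omega) hcond hmin]
    exact hC'.symm
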